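-- pv_equiv track=rewrite | github.com/fc-azurtech/contribuyentes_SII_hub_server | app/sii_sources.py | normalize_direcciones_rows
-- ===== SOURCE A (Python) =====
-- def _find_column(columns, aliases):
--     alias_norm = {a.strip().lower() for a in aliases}
--     for col in columns:
--         if (col or "").strip().lower() in alias_norm:
--             return col
--     return ""
--
-- def normalize_direcciones_rows(rows):
--     result = {}
--     for row in rows:
--         cols = list(row.keys())
--         rut_col = _find_column(cols, ["rut", "rut_contribuyente", "rutcntr", "rutcntrb"])
--         name_col = _find_column(cols, ["razon_social", "razon social", "nombre", "nombre_razon_social"])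
--         addr_col = _find_column(cols, ["direccion", "domicilio", "direccion_tributaria"])
--         city_col = _find_column(cols, ["ciudad"])
--         parish_col = _find_column(cols, ["comuna", "parish"])
--         email_col = _find_column(cols, ["dte_email", "correo", "mail", "email"])
--
--         rut = (row.get(rut_col) or "").strip()
--         if not rut:
--             continue
--         result[rut] = {
--             "rut": rut,
--             "legal_name": (row.get(name_col) or "").strip(),
--             "address": (row.get(addr_col) or "").strip(),
--             "city": (row.get(city_col) or "").strip(),
--             "parish": (row.get(parish_col) or "").strip(),
--             "dte_email": (row.get(email_col) or "").strip(),
--         }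
--     return result
-- ===== SOURCE B (Python) =====
-- _ALIAS_TO_FIELD = {
--     "rut": "rut", "rut_contribuyente": "rut", "rutcntr": "rut", "rutcntrb": "rut",
--     "razon_social": "legal_name", "razon social": "legal_name",
--     "nombre": "legal_name", "nombre_razon_social": "legal_name",
--     "direccion": "address", "domicilio": "address", "direccion_tributaria": "address",
--     "ciudad": "city",
--     "comuna": "parish", "parish": "parish",
--     "dte_email": "dte_email", "correo": "dte_email", "mail": "dte_email", "email": "dte_email",
-- }
--
-- _FIELDS = ["rut", "legal_name", "address", "city", "parish", "dte_email"]
--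
--
-- def normalize_direcciones_rows(rows):
--     result = {}
--     for row in rows:
--         # One pass over the row's columns: assign each column to its field,
--         # first matching column (in column order) wins, "" when none matches.
--         found = dict.fromkeys(_FIELDS, "")
--         for col in row:
--             field = _ALIAS_TO_FIELD.get((col or "").strip().lower())
--             if field is not None and not found[field]:
--                 found[field] = col
--         rut = (row.get(found["rut"]) or "").strip()
--         if not rut:
--             continue
--         result[rut] = {
--             "rut": rut,
--             "legal_name": (row.get(found["legal_name"]) or "").strip(),
--             "address": (row.get(found["address"]) or "").strip(),
--             "city": (row.get(found["city"]) or "").strip(),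
--             "parish": (row.get(found["parish"]) or "").strip(),
--             "dte_email": (row.get(found["dte_email"]) or "").strip(),
--         }
--     return result
-- ===== Notes on version B (the rewrite author's own statement) =====
-- stated objective: faster
-- what changed: Replaces the six separate _find_column scans per row (each rebuilding a normalized alias set) with a single pass over the row's columns using one precomputed alias->field dict, assigning each field its first matching column.
import Mathlib
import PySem

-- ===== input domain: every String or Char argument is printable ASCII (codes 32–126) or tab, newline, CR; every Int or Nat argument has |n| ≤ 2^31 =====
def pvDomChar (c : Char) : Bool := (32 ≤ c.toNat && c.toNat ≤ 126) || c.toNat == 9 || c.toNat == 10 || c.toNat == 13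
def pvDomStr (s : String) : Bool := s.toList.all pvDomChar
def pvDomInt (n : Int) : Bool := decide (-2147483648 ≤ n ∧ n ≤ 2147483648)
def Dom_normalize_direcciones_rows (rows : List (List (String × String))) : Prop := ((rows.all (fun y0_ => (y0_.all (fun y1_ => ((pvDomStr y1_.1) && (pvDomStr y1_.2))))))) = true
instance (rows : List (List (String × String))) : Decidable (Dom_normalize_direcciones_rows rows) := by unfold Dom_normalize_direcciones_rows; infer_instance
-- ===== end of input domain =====

-- B replaces A's six per-row _find_column scans (each rebuilding a normalized alias set) by a single
-- pass over the row's columns with one precomputed alias->field dictionary (first column wins per field).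

-- ===== PORT A =====
-- (col or "").strip().lower() — on Strings 'col or ""' is the identity
def pvNorm (s : String) : String := PySem.Str.lower (PySem.Str.strip s)

-- (row.get(c) or "").strip()
def pvGetS (row : PySem.Dict String String) (c : String) : String :=
  PySem.Str.strip (row.getD c "")

def find_column (columns : List String) (aliases : List String) : String :=
  let alias_norm : PySem.Set String := PySem.Set.ofList (aliases.map pvNorm)
  (columns.find? (fun col => alias_norm.contains (pvNorm col))).getD ""

def pvRowA (result : PySem.Dict String (List (String × String)))
    (row : List (String × String)) : PySem.Dict String (List (String × String)) :=
  let rowD := PySem.Dict.ofList row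
  let cols := rowD.keys
  let rut_col := find_column cols ["rut", "rut_contribuyente", "rutcntr", "rutcntrb"]
  let name_col := find_column cols ["razon_social", "razon social", "nombre", "nombre_razon_social"]
  let addr_col := find_column cols ["direccion", "domicilio", "direccion_tributaria"]
  let city_col := find_column cols ["ciudad"]
  let parish_col := find_column cols ["comuna", "parish"]
  let email_col := find_column cols ["dte_email", "correo", "mail", "email"]
  let rut := pvGetS rowD rut_col
  if rut = "" then result
  else result.insert rut
    [("rut", rut), ("legal_name", pvGetS rowD name_col), ("address", pvGetS rowD addr_col),
     ("city", pvGetS rowD city_col), ("parish", pvGetS rowD parish_col),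
     ("dte_email", pvGetS rowD email_col)]

def normalize_direcciones_rows (rows : List (List (String × String))) : List (String × List (String × String)) :=
  (rows.foldl pvRowA PySem.Dict.empty).items

-- ===== PORT B =====
def aliasToField : PySem.Dict String String := PySem.Dict.ofList
  [("rut", "rut"), ("rut_contribuyente", "rut"), ("rutcntr", "rut"), ("rutcntrb", "rut"),
   ("razon_social", "legal_name"), ("razon social", "legal_name"),
   ("nombre", "legal_name"), ("nombre_razon_social", "legal_name"),
   ("direccion", "address"), ("domicilio", "address"), ("direccion_tributaria", "address"),
   ("ciudad", "city"),
   ("comuna", "parish"), ("parish", "parish"),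
   ("dte_email", "dte_email"), ("correo", "dte_email"), ("mail", "dte_email"), ("email", "dte_email")]

-- one step of B's inner loop over the row's columns
def pvFoundStep (found : PySem.Dict String String) (col : String) : PySem.Dict String String :=
  match aliasToField.get? (pvNorm col) with
  | some field => if found.getD field "" = "" then found.insert field col else found
  | none => found

def pvRowB (result : PySem.Dict String (List (String × String)))
    (row : List (String × String)) : PySem.Dict String (List (String × String)) :=
  let rowD := PySem.Dict.ofList row
  let found := rowD.keys.foldl pvFoundStep
    (PySem.Dict.ofList [("rut", ""), ("legal_name", ""), ("address", ""),
                        ("city", ""), ("parish", ""), ("dte_email", "")])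
  let rut := pvGetS rowD (found.getD "rut" "")
  if rut = "" then result
  else result.insert rut
    [("rut", rut), ("legal_name", pvGetS rowD (found.getD "legal_name" "")),
     ("address", pvGetS rowD (found.getD "address" "")),
     ("city", pvGetS rowD (found.getD "city" "")),
     ("parish", pvGetS rowD (found.getD "parish" "")),
     ("dte_email", pvGetS rowD (found.getD "dte_email" ""))]

def normalize_direcciones_rows_alt (rows : List (List (String × String))) : List (String × List (String × String)) :=
  (rows.foldl pvRowB PySem.Dict.empty).items

-- ===== PRECONDITION & SPEC =====
def Spec_normalize_direcciones_rows (rows : List (List (String × String))) (out : List (String × List (String × String))) : Prop := out = normalize_direcciones_rows_alt rows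
instance (rows : List (List (String × String))) (out : List (String × List (String × String))) : Decidable (Spec_normalize_direcciones_rows rows out) := by unfold Spec_normalize_direcciones_rows; infer_instance

-- ===== CLAIM (what is proved, stated in full; the proofs are below) =====
def Claim_equal_normalize_direcciones_rows : Prop := ∀ (rows : List (List (String × String))), Dom_normalize_direcciones_rows rows → Spec_normalize_direcciones_rows rows (normalize_direcciones_rows rows)

-- ===== LEMMAS AND PROOFS =====

-- any string the alias dict maps somewhere is a key of the dict, hence nonempty
lemma aliasGet_ne_empty {s f : String} (h : aliasToField.get? s = some f) : s ≠ "" := by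
  intro hs; subst hs
  have h0 : aliasToField.get? "" = none := by decide
  simp [h0] at h

lemma pvNorm_empty : pvNorm "" = "" := by decide

-- A's set-membership test and B's dict lookup agree on each alias group
lemma contains_eq_lookup (G : List String) (f : String) (s : String)
    (h1 : ∀ a ∈ G, aliasToField.get? a = some f)
    (h2 : ∀ a ∈ aliasToField.keys, aliasToField.get? a = some f → a ∈ G) :
    (PySem.Set.ofList G).contains s = (aliasToField.get? s == some f) := by
  have hmem : (PySem.Set.ofList G).contains s = decide (s ∈ G) := by
    rcases h : (PySem.Set.ofList G).contains s with _ | _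
    · simp only [PySem.Set.contains] at h
      simp [PySem.Set.mem_ofList] at h
      simp [h]
    · simp only [PySem.Set.contains] at h
      simp [PySem.Set.mem_ofList] at h
      simp [h]
  rw [hmem]
  cases hl : aliasToField.get? s with
  | none =>
    have hs : s ∉ G := fun hm => by simp [h1 s hm] at hl
    simp [hs]
  | some f' =>
    by_cases hff : f' = f
    · subst hff
      have hk : s ∈ aliasToField.keys := by
        by_contra hk
        rw [← PySem.Dict.get?_eq_none_iff_not_mem_keys] at hk
        simp [hk] at hl
      simp [h2 s hk hl]
    · have hs : s ∉ G := fun hm => by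
        rw [h1 s hm] at hl; exact hff (Option.some.inj hl).symm
      simp [hs, hff]

-- B's inner fold, read at field f, is exactly the first column matching f (or "")
lemma found_fold (f : String) (cols : List String) :
    ∀ d : PySem.Dict String String,
    (cols.foldl pvFoundStep d).getD f "" =
      (if d.getD f "" = "" then
        (cols.find? (fun c => aliasToField.get? (pvNorm c) == some f)).getD ""
       else d.getD f "") := by
  induction cols with
  | nil => intro d; by_cases h : d.getD f "" = "" <;> simp [h]
  | cons c cols ih =>
    intro d
    rw [List.foldl_cons, List.find?_cons]
    cases hg : aliasToField.get? (pvNorm c) with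
    | none =>
      have hstep : pvFoundStep d c = d := by unfold pvFoundStep; rw [hg]
      rw [hstep]
      exact ih d
    | some g =>
      have hstep : pvFoundStep d c =
          (if d.getD g "" = "" then d.insert g c else d) := by
        unfold pvFoundStep; rw [hg]
      have hc : c ≠ "" := by
        intro h; subst h; exact aliasGet_ne_empty hg pvNorm_empty
      rw [hstep]
      by_cases hfg : g = f
      · subst hfg
        have hp : (some g == some g) = true := by simp
        simp only [hp]
        by_cases hd : d.getD g "" = ""
        · rw [if_pos hd, ih, PySem.Dict.getD_insert_self]
          simp [hc, hd]
        · rw [if_neg hd, ih]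
          simp [hd]
      · have hp : (some g == some f) = false := by simp [hfg]
        simp only [hp]
        by_cases hd : d.getD g "" = ""
        · rw [if_pos hd, ih, PySem.Dict.getD_insert_of_ne _ _ _ (fun h => hfg h.symm)]
        · rw [if_neg hd, ih]

-- combining the two: B's found-dict entry equals A's find_column, per group
lemma found_eq_find_column (cols : List String) (aliases G : List String) (f : String)
    (hG : aliases.map pvNorm = G)
    (h1 : ∀ a ∈ G, aliasToField.get? a = some f)
    (h2 : ∀ a ∈ aliasToField.keys, aliasToField.get? a = some f → a ∈ G)
    (hf0 : (PySem.Dict.ofList [("rut", ""), ("legal_name", ""), ("address", ""),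
            ("city", ""), ("parish", ""), ("dte_email", "")] : PySem.Dict String String).getD f "" = "") :
    (cols.foldl pvFoundStep
      (PySem.Dict.ofList [("rut", ""), ("legal_name", ""), ("address", ""),
                          ("city", ""), ("parish", ""), ("dte_email", "")])).getD f ""
      = find_column cols aliases := by
  rw [found_fold, hf0, if_pos rfl]
  simp only [find_column]
  rw [hG]
  have hpq : ∀ c, (aliasToField.get? (pvNorm c) == some f)
      = (PySem.Set.ofList G).contains (pvNorm c) :=
    fun c => (contains_eq_lookup G f (pvNorm c) h1 h2).symm
  simp only [hpq]

set_option maxHeartbeats 1000000 in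
lemma rowA_eq_rowB : pvRowA = pvRowB := by
  funext result row
  simp only [pvRowA, pvRowB]
  rw [found_eq_find_column ((PySem.Dict.ofList row).keys) ["rut", "rut_contribuyente", "rutcntr", "rutcntrb"] ["rut", "rut_contribuyente", "rutcntr", "rutcntrb"] "rut" (by decide) (by decide) (by decide) (by decide),
      found_eq_find_column ((PySem.Dict.ofList row).keys) ["razon_social", "razon social", "nombre", "nombre_razon_social"] ["razon_social", "razon social", "nombre", "nombre_razon_social"] "legal_name" (by decide) (by decide) (by decide) (by decide),
      found_eq_find_column ((PySem.Dict.ofList row).keys) ["direccion", "domicilio", "direccion_tributaria"] ["direccion", "domicilio", "direccion_tributaria"] "address" (by decide) (by decide) (by decide) (by decide),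
      found_eq_find_column ((PySem.Dict.ofList row).keys) ["ciudad"] ["ciudad"] "city" (by decide) (by decide) (by decide) (by decide),
      found_eq_find_column ((PySem.Dict.ofList row).keys) ["comuna", "parish"] ["comuna", "parish"] "parish" (by decide) (by decide) (by decide) (by decide),
      found_eq_find_column ((PySem.Dict.ofList row).keys) ["dte_email", "correo", "mail", "email"] ["dte_email", "correo", "mail", "email"] "dte_email" (by decide) (by decide) (by decide) (by decide)]

-- ===== VERDICT (by name: the statement is the Claim_ definition above) =====
theorem normalize_direcciones_rows_spec : Claim_equal_normalize_direcciones_rows := by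
  intro rows _
  unfold Spec_normalize_direcciones_rows normalize_direcciones_rows normalize_direcciones_rows_alt
  rw [rowA_eq_rowB]
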